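-- pv_equiv track=rewrite | github.com/ryuheechul/advent-of-code | 2024/python/12/part2.py | count_straight_lines
-- ===== SOURCE A (Python) =====
-- def count_straight_lines(target: list[int], upper: list[int], lower: list[int]):
--     count = 0
--
--     last_with_upper = False
--     last_with_lower = False
--
--     for x, plot_target in enumerate(target):
--         p_upper = upper[x]
--         p_lower = lower[x]
--
--         if plot_target:
--             # either 1s itself discontinued or 0s above
--             if not p_upper and not last_with_upper:
--                 count += 1
--
--             # either 1s itself discontinued or 0s below
--             if not p_lower and not last_with_lower:
--                 count += 1
--
--         last_with_upper = plot_target and not p_upper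
--         last_with_lower = plot_target and not p_lower
--
--     return count
-- ===== SOURCE B (Python) =====
-- def count_straight_lines(target: list[int], upper: list[int], lower: list[int]):
--     # Straight lines = maximal True runs of each boundary predicate.
--     # Count them with the identity: #runs = #True - #adjacent (True, True) pairs,
--     # so no run-start detection or carried state is needed at all.
--     up = [bool(t) and not u for t, u in zip(target, upper)]
--     lo = [bool(t) and not l for t, l in zip(target, lower)]
--
--     def runs(bs):
--         return sum(bs) - sum(1 for a, b in zip(bs, bs[1:]) if a and b)
--
--     return runs(up) + runs(lo)
-- ===== Notes on version B (the rewrite author's own statement) =====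
-- stated objective: alternative
-- what changed: Replaces A's fused stateful loop (flags last_with_upper/last_with_lower detecting run starts) by a stateless combinatorial identity: materialize each boundary predicate list and compute #runs = #True elements minus #adjacent True-True pairs, summing the two.
import Mathlib
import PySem

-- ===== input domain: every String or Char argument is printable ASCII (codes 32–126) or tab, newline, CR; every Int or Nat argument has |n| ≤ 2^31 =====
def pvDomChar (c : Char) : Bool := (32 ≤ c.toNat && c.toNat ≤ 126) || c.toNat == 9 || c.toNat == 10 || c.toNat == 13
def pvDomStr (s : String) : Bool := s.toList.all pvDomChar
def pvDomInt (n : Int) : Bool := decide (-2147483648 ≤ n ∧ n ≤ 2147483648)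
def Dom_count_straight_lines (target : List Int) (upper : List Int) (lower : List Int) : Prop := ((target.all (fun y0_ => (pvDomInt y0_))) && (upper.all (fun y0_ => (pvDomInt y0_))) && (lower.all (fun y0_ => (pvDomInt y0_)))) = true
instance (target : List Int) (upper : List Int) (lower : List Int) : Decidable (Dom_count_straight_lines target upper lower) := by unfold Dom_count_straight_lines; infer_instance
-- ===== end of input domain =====

-- B replaces A's stateful run-start-detecting loop by the stateless identity
-- #runs = #True − #adjacent True-True pairs on two materialized predicate lists (objective: alternative).

-- ===== PORT A =====
-- the for-loop of A: state (count, last_with_upper, last_with_lower), index x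
def pvLoopA (upper lower : List Int) : List Int → Nat → Int → Bool → Bool → Int
  | [], _, count, _, _ => count
  | pt :: rest, x, count, lastU, lastL =>
    let pu := PySem.List.pyGetD upper (x : Int) 0
    let pl := PySem.List.pyGetD lower (x : Int) 0
    let count1 := if pt ≠ 0 ∧ (pu = 0 ∧ lastU = false) then count + 1 else count
    let count2 := if pt ≠ 0 ∧ (pl = 0 ∧ lastL = false) then count1 + 1 else count1
    pvLoopA upper lower rest (x + 1) count2
      (decide (pt ≠ 0) && decide (pu = 0)) (decide (pt ≠ 0) && decide (pl = 0))

def count_straight_lines (target : List Int) (upper : List Int) (lower : List Int) : Int :=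
  pvLoopA upper lower target 0 0 false false

-- ===== PORT B =====
-- up/lo predicate lists: [bool(t) and not u for t, u in zip(target, other)]
def pvMask (target other : List Int) : List Bool :=
  (target.zip other).map (fun tu => decide (tu.1 ≠ 0) && decide (tu.2 = 0))

-- runs(bs) = sum(bs) - sum(1 for a, b in zip(bs, bs[1:]) if a and b)
def pvRuns (bs : List Bool) : Int :=
  bs.foldl (fun c b => if b then c + 1 else c) 0
    - (bs.zip bs.tail).foldl (fun c p => if p.1 && p.2 then c + 1 else c) 0

def count_straight_lines_alt (target : List Int) (upper : List Int) (lower : List Int) : Int :=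
  pvRuns (pvMask target upper) + pvRuns (pvMask target lower)

-- ===== PRECONDITION & SPEC =====
-- A indexes upper[x] and lower[x] for every x < len(target); shorter lists raise IndexError.
def Pre_count_straight_lines (target : List Int) (upper : List Int) (lower : List Int) : Prop :=
  target.length ≤ upper.length ∧ target.length ≤ lower.length
instance (target : List Int) (upper : List Int) (lower : List Int) : Decidable (Pre_count_straight_lines target upper lower) := by unfold Pre_count_straight_lines; infer_instance

def pvWitness_count_straight_lines : List Int × List Int × List Int :=
  ([1, 1, 0, 1], [0, 1, 0, 0], [0, 0, 0, 0])

def Spec_count_straight_lines (target : List Int) (upper : List Int) (lower : List Int) (out : Int) : Prop := out = count_straight_lines_alt target upper lower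
instance (target : List Int) (upper : List Int) (lower : List Int) (out : Int) : Decidable (Spec_count_straight_lines target upper lower out) := by unfold Spec_count_straight_lines; infer_instance

-- ===== CLAIM (what is proved, stated in full; the proofs are below) =====
def Claim_equal_count_straight_lines : Prop := ∀ (target : List Int) (upper : List Int) (lower : List Int), Dom_count_straight_lines target upper lower → Pre_count_straight_lines target upper lower → Spec_count_straight_lines target upper lower (count_straight_lines target upper lower)

-- ===== LEMMAS AND PROOFS =====

-- number of maximal True runs of bs, given the value preceding bs (characterizes A's loop)
def pvStarts : Bool → List Bool → Int
  | _, [] => 0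
  | prev, b :: bs => (if b = true ∧ prev = false then 1 else 0) + pvStarts b bs

-- number of True elements (structural)
def pvT : List Bool → Int
  | [] => 0
  | b :: bs => (if b then 1 else 0) + pvT bs

-- number of adjacent True-True pairs of prev :: bs (structural)
def pvAdj : Bool → List Bool → Int
  | _, [] => 0
  | prev, b :: bs => (if prev && b then 1 else 0) + pvAdj b bs

-- the predicate list A's loop reads, starting at index x
def pvMaskIdx (other : List Int) : Nat → List Int → List Bool
  | _, [] => []
  | x, t :: rest =>
    (decide (t ≠ 0) && decide (PySem.List.pyGetD other (x : Int) 0 = 0)) ::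
      pvMaskIdx other (x + 1) rest

theorem pvT_foldl (bs : List Bool) : ∀ (c : Int),
    bs.foldl (fun c b => if b then c + 1 else c) c = c + pvT bs := by
  induction bs with
  | nil => intro c; simp [pvT]
  | cons b bs ih => intro c; cases b <;> simp [pvT, ih] <;> omega

theorem pvAdj_foldl (rest : List Bool) : ∀ (b : Bool) (c : Int),
    ((b :: rest).zip rest).foldl (fun c p => if p.1 && p.2 then c + 1 else c) c
      = c + pvAdj b rest := by
  induction rest with
  | nil => intro b c; simp [pvAdj]
  | cons r rs ih =>
    intro b c
    simp only [List.zip_cons_cons, List.foldl_cons, pvAdj, ih]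
    split_ifs <;> omega

theorem pvStarts_eq_sub (bs : List Bool) : ∀ (prev : Bool),
    pvStarts prev bs = pvT bs - pvAdj prev bs := by
  induction bs with
  | nil => intro prev; simp [pvStarts, pvT, pvAdj]
  | cons b bs ih =>
    intro prev
    have h := ih b
    cases b <;> cases prev <;>
      simp only [pvStarts, pvT, pvAdj, h, Bool.and_true, Bool.and_false, reduceCtorEq,
        and_true, and_false, false_and, and_self, if_true, if_false, ite_true, ite_false] <;>
      omega

theorem pvRuns_eq_starts (bs : List Bool) : pvRuns bs = pvStarts false bs := by
  cases bs with
  | nil => simp [pvRuns, pvStarts]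
  | cons b rest =>
    have h1 := pvT_foldl (b :: rest) 0
    have h2 := pvAdj_foldl rest b 0
    have h3 := pvStarts_eq_sub (b :: rest) false
    simp only [pvRuns, List.tail_cons] at *
    rw [h1, h2, h3]
    simp [pvAdj]

theorem pvLoopA_eq (upper lower : List Int) (ts : List Int) :
    ∀ (x : Nat) (c : Int) (lU lL : Bool),
    pvLoopA upper lower ts x c lU lL
      = c + pvStarts lU (pvMaskIdx upper x ts) + pvStarts lL (pvMaskIdx lower x ts) := by
  induction ts with
  | nil => intro x c lU lL; simp [pvLoopA, pvMaskIdx, pvStarts]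
  | cons t rest ih =>
    intro x c lU lL
    simp only [pvLoopA, pvMaskIdx, pvStarts, ih, Bool.and_eq_true, decide_eq_true_eq]
    split_ifs <;> simp_all <;> omega

theorem pvMaskIdx_eq_mask (other : List Int) (ts : List Int) :
    ∀ (x : Nat), ts.length + x ≤ other.length →
    pvMaskIdx other x ts = pvMask ts (other.drop x) := by
  induction ts with
  | nil => intro x h; simp [pvMaskIdx, pvMask]
  | cons t rest ih =>
    intro x h
    have hx : x < other.length := by simp at h; omega
    rw [List.drop_eq_getElem_cons hx]
    simp only [pvMaskIdx, pvMask, List.zip_cons_cons, List.map_cons]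
    congr 1
    · rw [PySem.List.pyGetD_natCast]
      simp [List.getD_eq_getElem?_getD, List.getElem?_eq_getElem hx]
    · have := ih (x + 1) (by simp at h ⊢; omega)
      simpa [pvMask] using this

-- ===== VERDICT (by name: the statement is the Claim_ definition above) =====
theorem count_straight_lines_spec : Claim_equal_count_straight_lines := by
  intro target upper lower _ hpre
  obtain ⟨h1, h2⟩ := hpre
  unfold Spec_count_straight_lines count_straight_lines count_straight_lines_alt
  rw [pvLoopA_eq, pvMaskIdx_eq_mask upper target 0 (by omega),
      pvMaskIdx_eq_mask lower target 0 (by omega),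
      pvRuns_eq_starts, pvRuns_eq_starts]
  simp
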